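-- pv_equiv track=rewrite | github.com/juhyeonjyu/SKRookies-module-project | Module 2/app/mask_pii.py | mask_digits_keep_first
-- ===== SOURCE A (Python) =====
-- def mask_digits_keep_first(s: str, first_keep: int, mask_char: str="*") -> str:
--     out, kept = [], 0
--     for ch in s:
--         if ch.isdigit():
--             if kept < first_keep:
--                 out.append(ch); kept += 1
--             else:
--                 out.append(mask_char)
--         else:
--             out.append(ch)
--     return "".join(out)
-- ===== SOURCE B (Python) =====
-- def mask_digits_keep_first(s: str, first_keep: int, mask_char: str = "*") -> str:
--     # two-pass: find the cutoff index just before the (first_keep+1)-th digit,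
--     # then keep the prefix verbatim and mask every digit in the suffix
--     seen = 0
--     cut = len(s)
--     for i, ch in enumerate(s):
--         if ch.isdigit():
--             if seen >= first_keep:
--                 cut = i
--                 break
--             seen += 1
--     return s[:cut] + "".join(mask_char if c.isdigit() else c for c in s[cut:])
-- ===== Notes on version B (the rewrite author's own statement) =====
-- stated objective: alternative
-- what changed: Replaces A's single stateful loop (counter + per-char append) by a two-pass split: first locate the cutoff index right before the (first_keep+1)-th digit, then return the untouched prefix concatenated with a stateless masked transform of the suffix.
import Mathlib
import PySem

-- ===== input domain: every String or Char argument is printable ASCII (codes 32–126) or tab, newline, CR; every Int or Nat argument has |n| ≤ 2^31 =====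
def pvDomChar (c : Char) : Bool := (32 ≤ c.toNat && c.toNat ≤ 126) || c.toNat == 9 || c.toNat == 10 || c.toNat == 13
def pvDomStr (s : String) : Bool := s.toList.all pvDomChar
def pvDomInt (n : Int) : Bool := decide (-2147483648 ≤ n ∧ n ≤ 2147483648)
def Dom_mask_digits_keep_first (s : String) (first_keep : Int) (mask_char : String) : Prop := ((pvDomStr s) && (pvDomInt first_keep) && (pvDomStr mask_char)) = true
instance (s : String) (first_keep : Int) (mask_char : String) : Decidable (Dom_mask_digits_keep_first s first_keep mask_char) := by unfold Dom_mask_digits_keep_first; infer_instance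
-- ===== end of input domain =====

-- B replaces A's single counting loop by a two-pass cutoff-then-mask split; objective: alternative decomposition.


-- ===== PORT A =====
-- A's for-loop with accumulator (out, kept): structural recursion over the characters,
-- producing the list of appended pieces; "".join(out) at the end.
def pvMaskLoop (first_keep : Int) (mask_char : List Char) : List Char → Int → List (List Char)
  | [], _ => []
  | ch :: rest, kept =>
    if PySem.Chars.isdigit ch then
      if kept < first_keep then [ch] :: pvMaskLoop first_keep mask_char rest (kept + 1)
      else mask_char :: pvMaskLoop first_keep mask_char rest kept
    else [ch] :: pvMaskLoop first_keep mask_char rest kept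

def mask_digits_keep_first (s : String) (first_keep : Int) (mask_char : String) : String :=
  String.mk (PySem.Chars.join [] (pvMaskLoop first_keep mask_char.toList s.toList 0))

-- ===== PORT B =====
-- B's first pass: the enumerate-loop with break, returning the cutoff (offset before the
-- (first_keep+1)-th digit; the whole length if the loop never breaks).
def pvCut (first_keep : Int) : List Char → Int → Nat
  | [], _ => 0
  | ch :: rest, seen =>
    if PySem.Chars.isdigit ch then
      if first_keep ≤ seen then 0 else 1 + pvCut first_keep rest (seen + 1)
    else 1 + pvCut first_keep rest seen

-- s[:cut] / s[cut:] with 0 ≤ cut ≤ len s are exactly take/drop.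
def mask_digits_keep_first_alt (s : String) (first_keep : Int) (mask_char : String) : String :=
  let cs := s.toList
  let cut := pvCut first_keep cs 0
  String.mk (cs.take cut ++ PySem.Chars.join []
    ((cs.drop cut).map (fun c => if PySem.Chars.isdigit c then mask_char.toList else [c])))

-- ===== PRECONDITION & SPEC =====
def Spec_mask_digits_keep_first (s : String) (first_keep : Int) (mask_char : String) (out : String) : Prop := out = mask_digits_keep_first_alt s first_keep mask_char
instance (s : String) (first_keep : Int) (mask_char : String) (out : String) : Decidable (Spec_mask_digits_keep_first s first_keep mask_char out) := by unfold Spec_mask_digits_keep_first; infer_instance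

-- ===== CLAIM (what is proved, stated in full; the proofs are below) =====
def Claim_equal_mask_digits_keep_first : Prop := ∀ (s : String) (first_keep : Int) (mask_char : String), Dom_mask_digits_keep_first s first_keep mask_char → Spec_mask_digits_keep_first s first_keep mask_char (mask_digits_keep_first s first_keep mask_char)

-- ===== LEMMAS AND PROOFS =====
theorem pv_join_nil_cons (p : List Char) (ps : List (List Char)) :
    PySem.Chars.join [] (p :: ps) = p ++ PySem.Chars.join [] ps := by
  cases ps with
  | nil => simp [PySem.Chars.join_singleton, PySem.Chars.join_nil]
  | cons q rest => simpa using PySem.Chars.join_cons_cons [] p q rest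

-- once the counter has reached first_keep, A masks every digit (the counter never moves again)
theorem pv_maskLoop_saturated (fk : Int) (mc : List Char) (l : List Char) (k : Int)
    (h : fk ≤ k) :
    pvMaskLoop fk mc l k = l.map (fun c => if PySem.Chars.isdigit c then mc else [c]) := by
  induction l with
  | nil => simp [pvMaskLoop]
  | cons c rest ih =>
    simp only [pvMaskLoop, List.map_cons]
    by_cases hd : PySem.Chars.isdigit c
    · simp [hd, not_lt.mpr h, ih]
    · simp [hd, ih]

-- main invariant: A's joined output = untouched prefix up to the cutoff + masked suffix
theorem pv_main (fk : Int) (mc : List Char) (l : List Char) (k : Int) :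
    PySem.Chars.join [] (pvMaskLoop fk mc l k) =
      l.take (pvCut fk l k) ++ PySem.Chars.join []
        ((l.drop (pvCut fk l k)).map (fun c => if PySem.Chars.isdigit c then mc else [c])) := by
  induction l generalizing k with
  | nil => simp [pvMaskLoop, pvCut, PySem.Chars.join_nil]
  | cons c rest ih =>
    by_cases hd : PySem.Chars.isdigit c
    · by_cases hk : k < fk
      · simp only [pvMaskLoop, pvCut, hd, if_pos hk, if_neg (not_le.mpr hk), if_true,
          pv_join_nil_cons]
        rw [ih (k + 1)]
        simp [List.take_succ_cons, List.drop_succ_cons, Nat.add_comm]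
      · have hle : fk ≤ k := not_lt.mp hk
        simp only [pvMaskLoop, pvCut, hd, if_neg hk, if_pos hle, if_true, pv_join_nil_cons]
        rw [pv_maskLoop_saturated fk mc rest k hle]
        simp [hd, pv_join_nil_cons]
    · simp only [pvMaskLoop, pvCut, hd, Bool.false_eq_true, if_false, pv_join_nil_cons]
      rw [ih k]
      simp [List.take_succ_cons, List.drop_succ_cons, Nat.add_comm]

-- ===== VERDICT (by name: the statement is the Claim_ definition above) =====
theorem mask_digits_keep_first_spec : Claim_equal_mask_digits_keep_first := by
  intro s fk mc _
  show _ = _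
  unfold mask_digits_keep_first mask_digits_keep_first_alt
  rw [pv_main]
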